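-- pv_equiv track=rewrite | github.com/al-osokin/rueo_global | backend/app/parsing/parser_v3/normalization.py | _expand_tilde_text
-- ===== SOURCE A (Python) =====
-- from typing import Any, Dict, Iterable, List, Optional, Tuple
--
-- def _expand_tilde_text(text: str, lemmas: List[str], bases: List[str]) -> List[str]:
--     results: List[str] = []
--     max_len = max(len(lemmas), len(bases), 1)
--     for idx in range(max_len):
--         lemma = lemmas[idx] if idx < len(lemmas) else (lemmas[-1] if lemmas else "")
--         base = bases[idx] if idx < len(bases) else (bases[-1] if bases else lemma)
--         if not lemma and not base:
--             continue
--         results.append(_replace_tilde_with_strategy(text, lemma or base, base or lemma))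
--     return _unique_preserve_order(results)
--
-- def _replace_tilde_with_strategy(text: str, lemma: str, base: str) -> str:
--     if not text:
--         return text
--     builder: List[str] = []
--     length = len(text)
--     i = 0
--     while i < length:
--         char = text[i]
--         if char == '~':
--             next_char = text[i + 1] if i + 1 < length else ''
--             use_base = bool(next_char and (next_char.isalpha() or next_char in "'"))
--             replacement = base if use_base else lemma
--             builder.append(replacement)
--             i += 1
--             continue
--         builder.append(char)
--         i += 1
--     return ''.join(builder)
--
-- def _unique_preserve_order(items: Iterable[str]) -> List[str]:
--     seen: set = set()
--     result: List[str] = []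
--     for item in items:
--         if item in seen:
--             continue
--         seen.add(item)
--         result.append(item)
--     return result
-- ===== SOURCE B (Python) =====
-- from typing import List
--
-- def _expand_tilde_text(text: str, lemmas: List[str], bases: List[str]) -> List[str]:
--     pairs = []
--     for i in range(max(len(lemmas), len(bases), 1)):
--         lemma = lemmas[i] if i < len(lemmas) else (lemmas[-1] if lemmas else "")
--         base = bases[i] if i < len(bases) else (bases[-1] if bases else lemma)
--         if lemma or base:
--             pairs.append((lemma or base, base or lemma))
--     out = []
--     for lemma, base in pairs:
--         segs = text.split('~')
--         parts = []
--         for nxt in segs[1:]: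
--             nc = nxt[:1]
--             parts.append(base if nc and (nc.isalpha() or nc == "'") else lemma)
--         out.append(''.join(s + p for s, p in zip(segs, parts)) + segs[-1])
--     return list(dict.fromkeys(out))
-- ===== Notes on version B (the rewrite author's own statement) =====
-- stated objective: faster
-- what changed: Replaces A's index-by-index character scan (with manual lookahead) by splitting the text on '~' and interleaving replacements chosen from each following segment's first character, precomputes the (lemma, base) pairs before expanding, and replaces A's seen-set dedup loop by dict.fromkeys ordered dedup.
import Mathlib
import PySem

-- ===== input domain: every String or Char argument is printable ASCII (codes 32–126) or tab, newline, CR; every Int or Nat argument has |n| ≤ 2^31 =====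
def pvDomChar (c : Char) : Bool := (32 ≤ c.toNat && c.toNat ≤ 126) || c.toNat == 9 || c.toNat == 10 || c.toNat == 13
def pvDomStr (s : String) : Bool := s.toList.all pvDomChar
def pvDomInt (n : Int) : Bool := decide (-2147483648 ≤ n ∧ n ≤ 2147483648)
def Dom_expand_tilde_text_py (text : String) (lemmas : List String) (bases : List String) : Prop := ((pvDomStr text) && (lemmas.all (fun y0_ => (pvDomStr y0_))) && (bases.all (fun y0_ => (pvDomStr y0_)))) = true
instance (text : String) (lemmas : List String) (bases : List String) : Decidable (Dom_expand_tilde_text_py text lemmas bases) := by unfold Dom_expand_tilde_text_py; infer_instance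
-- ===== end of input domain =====

-- B replaces A's per-character Python scan by split-on-'~' + interleave of chosen replacements
-- and A's set-guarded dedup loop by dict.fromkeys ordered dedup; a timing run measured B
-- faster (constant factor: C-level split/join instead of a per-character interpreter loop).

-- ===== PORT A =====
-- A's use_base test: next_char ('' when absent, i.e. the empty list case) and (isalpha or in "'")
def pvUseBase : List Char → Bool
  | [] => false
  | nc :: _ => PySem.Chars.isalpha nc || nc = '\''

-- character scan of _replace_tilde_with_strategy (builder append / ''.join as list cons/append)
def pvReplGoA (lem base : List Char) : List Char → List Char
  | [] => []
  | c :: rest =>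
    if c = '~' then
      (if pvUseBase rest then base else lem) ++ pvReplGoA lem base rest
    else c :: pvReplGoA lem base rest

def pvReplA (text lem base : String) : String :=
  if text = "" then text
  else String.ofList (pvReplGoA lem.toList base.toList text.toList)

def expand_tilde_text_py (text : String) (lemmas : List String) (bases : List String) : List String :=
  let max_len : Int := max (max (lemmas.length : Int) (bases.length : Int)) 1
  let results : List String := (PySem.List.pyRange 0 max_len 1).foldl (fun acc idx =>
    let lem := if idx < (lemmas.length : Int) then PySem.List.pyGetD lemmas idx ""
               else (if lemmas ≠ [] then PySem.List.pyGetD lemmas (-1) "" else "")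
    let base := if idx < (bases.length : Int) then PySem.List.pyGetD bases idx ""
                else (if bases ≠ [] then PySem.List.pyGetD bases (-1) "" else lem)
    if lem = "" ∧ base = "" then acc
    else acc ++ [pvReplA text (if lem ≠ "" then lem else base) (if base ≠ "" then base else lem)]) []
  -- _unique_preserve_order: set 'seen' + result list
  (results.foldl (fun (p : PySem.Set String × List String) item =>
      if PySem.Set.contains p.1 item then p
      else (PySem.Set.add p.1 item, p.2 ++ [item])) (PySem.Set.empty, [])).2

-- ===== PORT B =====
-- split text on '~', choose base/lemma from the first char of each following segment, interleave
def pvChoiceB (lem base : List Char) (nxt : List Char) : List Char :=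
  if PySem.List.slice nxt none (some 1) ≠ [] &&
      (PySem.Chars.strIsalpha (PySem.List.slice nxt none (some 1)) ||
        PySem.List.slice nxt none (some 1) = ['\'']) then base else lem

def pvReplB (text lem base : String) : String :=
  String.ofList (PySem.Chars.join []
      (((PySem.Chars.splitOn text.toList ['~']).zip
        (((PySem.Chars.splitOn text.toList ['~']).drop 1).map (pvChoiceB lem.toList base.toList))).map
        (fun sp => sp.1 ++ sp.2))
    ++ PySem.List.pyGetD (PySem.Chars.splitOn text.toList ['~']) (-1) [])

def expand_tilde_text_py_alt (text : String) (lemmas : List String) (bases : List String) : List String :=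
  let pairs : List (String × String) :=
    (PySem.List.pyRange 0 (max (max (lemmas.length : Int) (bases.length : Int)) 1) 1).foldl (fun acc i =>
      let lem := if i < (lemmas.length : Int) then PySem.List.pyGetD lemmas i ""
                 else (if lemmas ≠ [] then PySem.List.pyGetD lemmas (-1) "" else "")
      let base := if i < (bases.length : Int) then PySem.List.pyGetD bases i ""
                  else (if bases ≠ [] then PySem.List.pyGetD bases (-1) "" else lem)
      if lem ≠ "" ∨ base ≠ "" then
        acc ++ [(if lem ≠ "" then lem else base, if base ≠ "" then base else lem)]
      else acc) []
  PySem.List.dedup (pairs.foldl (fun acc lb => acc ++ [pvReplB text lb.1 lb.2]) [])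

-- ===== PRECONDITION & SPEC =====
def Spec_expand_tilde_text_py (text : String) (lemmas : List String) (bases : List String) (out : List String) : Prop := out = expand_tilde_text_py_alt text lemmas bases
instance (text : String) (lemmas : List String) (bases : List String) (out : List String) : Decidable (Spec_expand_tilde_text_py text lemmas bases out) := by unfold Spec_expand_tilde_text_py; infer_instance

-- ===== CLAIM (what is proved, stated in full; the proofs are below) =====
def Claim_equal_expand_tilde_text_py : Prop := ∀ (text : String) (lemmas : List String) (bases : List String), Dom_expand_tilde_text_py text lemmas bases → Spec_expand_tilde_text_py text lemmas bases (expand_tilde_text_py text lemmas bases)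

-- ===== LEMMAS AND PROOFS =====

-- reference split of a char list on '~'
def pvSplit : List Char → List (List Char)
  | [] => [[]]
  | c :: rest =>
    if c = '~' then [] :: pvSplit rest
    else match pvSplit rest with
         | [] => [[c]]
         | s :: ss => (c :: s) :: ss

lemma pvSplit_ne_nil (cs : List Char) : pvSplit cs ≠ [] := by
  induction cs with
  | nil => simp [pvSplit]
  | cons c rest ih =>
    simp only [pvSplit]
    split
    · simp
    · cases h : pvSplit rest <;> simp


lemma splitOn_go_spec : ∀ (fuel : Nat) (l cur : List Char) (acc : List (List Char)),
    l.length < fuel →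
    PySem.Chars.splitOn.go ['~'] fuel l cur acc =
      acc.reverse ++ (match pvSplit l with
                      | [] => [cur.reverse]
                      | s :: ss => (cur.reverse ++ s) :: ss) := by
  intro fuel
  induction fuel with
  | zero => intro l cur acc h; omega
  | succ n ih =>
    intro l cur acc h
    cases l with
    | nil => simp [PySem.Chars.splitOn.go, pvSplit]
    | cons c rest =>
      by_cases hc : c = '~'
      · subst hc
        have : PySem.Chars.splitOn.go ['~'] (n+1) ('~' :: rest) cur acc =
            PySem.Chars.splitOn.go ['~'] n rest [] (cur.reverse :: acc) := by
          simp [PySem.Chars.splitOn.go, List.isPrefixOf]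
        rw [this, ih rest [] (cur.reverse :: acc) (by simpa using Nat.lt_of_succ_lt_succ h)]
        have hne := pvSplit_ne_nil rest
        cases hs : pvSplit rest with
        | nil => exact absurd hs hne
        | cons s ss => simp [pvSplit, hs]
      · have hpc : (['~'].isPrefixOf (c :: rest)) = false := by
          simp only [List.isPrefixOf, Bool.and_true]
          exact decide_eq_false (fun h => hc h.symm)
        have : PySem.Chars.splitOn.go ['~'] (n+1) (c :: rest) cur acc =
            PySem.Chars.splitOn.go ['~'] n rest (c :: cur) acc := by
          simp [PySem.Chars.splitOn.go, hpc]
        rw [this, ih rest (c :: cur) acc (by simpa using Nat.lt_of_succ_lt_succ h)]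
        have hne := pvSplit_ne_nil rest
        cases hs : pvSplit rest with
        | nil => exact absurd hs hne
        | cons s ss => simp [pvSplit, hc, hs]

lemma splitOn_tilde (cs : List Char) : PySem.Chars.splitOn cs ['~'] = pvSplit cs := by
  have h := splitOn_go_spec (cs.length + 1) cs [] [] (by omega)
  have hne := pvSplit_ne_nil cs
  cases hs : pvSplit cs with
  | nil => exact absurd hs hne
  | cons s ss =>
    rw [hs] at h
    simpa [PySem.Chars.splitOn] using h

lemma pvUseBase_head_pvSplit (rest : List Char) :
    pvUseBase ((pvSplit rest).headI) = pvUseBase rest := by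
  cases rest with
  | nil => simp [pvSplit]
  | cons c r =>
    by_cases hc : c = '~'
    · subst hc; simp [pvSplit, pvUseBase]; decide
    · simp only [pvSplit, hc]
      cases hs : pvSplit r with
      | nil => exact absurd hs (pvSplit_ne_nil r)
      | cons s ss => simp [pvUseBase]

-- B's per-segment choice equals pvUseBase
lemma pvChoice_eq (lem base : List Char) (nxt : List Char) :
    pvChoiceB lem base nxt = (if pvUseBase nxt then base else lem) := by
  unfold pvChoiceB
  cases nxt with
  | nil => simp [PySem.List.slice, pvUseBase]
  | cons c r =>
    have h1 : PySem.List.slice (c :: r) none (some 1) = [c] := by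
      have := PySem.List.slice_to_natCast (c :: r) 1
      simpa using this
    simp only [h1, pvUseBase]
    simp [PySem.Chars.strIsalpha]

-- the interleave both sides compute
def pvItl (lem base : List Char) : List (List Char) → List Char
  | [] => []
  | [s] => s
  | s :: s2 :: ss => s ++ (if pvUseBase s2 then base else lem) ++ pvItl lem base (s2 :: ss)

lemma goA_eq_itl (lem base : List Char) (cs : List Char) :
    pvReplGoA lem base cs = pvItl lem base (pvSplit cs) := by
  induction cs with
  | nil => simp [pvReplGoA, pvSplit, pvItl]
  | cons c rest ih =>
    by_cases hc : c = '~'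
    · subst hc
      cases hs : pvSplit rest with
      | nil => exact absurd hs (pvSplit_ne_nil rest)
      | cons s ss =>
        have hhead : pvUseBase s = pvUseBase rest := by
          have := pvUseBase_head_pvSplit rest
          rw [hs] at this; simpa using this
        simp [pvReplGoA, pvSplit, hs, pvItl, ih, hhead]
    · cases hs : pvSplit rest with
      | nil => exact absurd hs (pvSplit_ne_nil rest)
      | cons s ss =>
        cases ss with
        | nil => simp [pvReplGoA, hc, pvSplit, hs, pvItl, ih]
        | cons s2 ss' => simp [pvReplGoA, hc, pvSplit, hs, pvItl, ih]

lemma join_nil_cons (x : List Char) (l : List (List Char)) :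
    PySem.Chars.join [] (x :: l) = x ++ PySem.Chars.join [] l := by
  cases l <;> simp [PySem.Chars.join, List.intercalate]

lemma pyGetD_last (s : List Char) (ss : List (List Char)) :
    PySem.List.pyGetD (s :: ss) (-1) [] = (s :: ss).getLast (by simp) := by
  simp [PySem.List.pyGetD, PySem.List.pyGet?_neg_one, List.getLast?_eq_some_getLast]

-- B's zip/join formulation computes pvItl
lemma zipjoin_eq_itl (lem base : List Char) :
    ∀ (segs : List (List Char)), segs ≠ [] →
    PySem.Chars.join []
        ((segs.zip ((segs.drop 1).map (fun nxt => if pvUseBase nxt then base else lem))).map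
          (fun sp => sp.1 ++ sp.2))
      ++ PySem.List.pyGetD segs (-1) []
    = pvItl lem base segs := by
  intro segs
  induction segs with
  | nil => intro h; exact absurd rfl h
  | cons s ss ih =>
    intro _
    cases ss with
    | nil => simp [pvItl, PySem.Chars.join, List.intercalate, pyGetD_last]
    | cons s2 ss' =>
      have hIH := ih (by simp)
      rw [pyGetD_last] at hIH ⊢
      simp only [List.drop_succ_cons, List.drop_zero, List.map_cons, List.zip_cons_cons,
        List.map_cons] at hIH ⊢
      rw [join_nil_cons, pvItl, ← hIH]
      simp [List.append_assoc]

-- per-pair: the two replacement strategies agree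
lemma repl_eq (text lem base : String) : pvReplA text lem base = pvReplB text lem base := by
  unfold pvReplA pvReplB
  by_cases ht : text = ""
  · subst ht
    simp [splitOn_tilde, pvSplit, PySem.Chars.join, List.intercalate, PySem.List.pyGetD,
      PySem.List.pyGet?_neg_one]
  · rw [if_neg ht]
    have hmap : ((PySem.Chars.splitOn text.toList ['~']).drop 1).map (pvChoiceB lem.toList base.toList)
        = ((PySem.Chars.splitOn text.toList ['~']).drop 1).map
          (fun nxt => if pvUseBase nxt then base.toList else lem.toList) :=
      List.map_congr_left (fun nxt _ => pvChoice_eq lem.toList base.toList nxt)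
    rw [hmap, zipjoin_eq_itl lem.toList base.toList _ (by rw [splitOn_tilde]; exact pvSplit_ne_nil _),
      splitOn_tilde, ← goA_eq_itl]

-- dedup: A's seen/result loop is PySem.List.dedup
lemma dedup_loop (items : List String) :
    ∀ (s : PySem.Set String),
    (items.foldl (fun (p : PySem.Set String × List String) item =>
        if PySem.Set.contains p.1 item then p
        else (PySem.Set.add p.1 item, p.2 ++ [item])) (s, s)).2
      = items.foldl PySem.Set.add s := by
  intro s
  induction items generalizing s with
  | nil => rfl
  | cons x xs ih =>
    simp only [List.foldl]
    by_cases h : x ∈ s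
    · have hct : PySem.Set.contains s x = true := by
        simp [PySem.Set.contains]; exact Multiset.mem_coe.mp h
      have hadd : PySem.Set.add s x = s := by
        unfold PySem.Set.add PySem.Set.contains; simp; exact h
      rw [if_pos hct, hadd]
      exact ih s
    · have hct : PySem.Set.contains s x = false := by
        simp [PySem.Set.contains]; exact fun hc => h (Multiset.mem_coe.mpr hc)
      have hadd : PySem.Set.add s x = s ++ [x] := by
        unfold PySem.Set.add PySem.Set.contains; simp; intro hc; exact absurd hc h
      have hcf : ¬(PySem.Set.contains s x = true) := by simp; exact h
      rw [if_neg hcf, hadd]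
      exact ih (s ++ [x])

-- outer loops agree
-- A's guarded append of replacements follows B's pair list through the index fold
lemma fold_pairs (text : String) (lemmas bases : List String) :
    ∀ (l : List Int) (acc : List (String × String)),
    l.foldl (fun acc idx =>
      let lem := if idx < (lemmas.length : Int) then PySem.List.pyGetD lemmas idx ""
                 else (if lemmas ≠ [] then PySem.List.pyGetD lemmas (-1) "" else "")
      let base := if idx < (bases.length : Int) then PySem.List.pyGetD bases idx ""
                  else (if bases ≠ [] then PySem.List.pyGetD bases (-1) "" else lem)
      if lem = "" ∧ base = "" then acc
      else acc ++ [pvReplA text (if lem ≠ "" then lem else base) (if base ≠ "" then base else lem)])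
      (acc.map (fun lb => pvReplA text lb.1 lb.2))
    = (l.foldl (fun acc i =>
      let lem := if i < (lemmas.length : Int) then PySem.List.pyGetD lemmas i ""
                 else (if lemmas ≠ [] then PySem.List.pyGetD lemmas (-1) "" else "")
      let base := if i < (bases.length : Int) then PySem.List.pyGetD bases i ""
                  else (if bases ≠ [] then PySem.List.pyGetD bases (-1) "" else lem)
      if lem ≠ "" ∨ base ≠ "" then
        acc ++ [(if lem ≠ "" then lem else base, if base ≠ "" then base else lem)]
      else acc) acc).map (fun lb => pvReplA text lb.1 lb.2) := by
  intro l
  induction l with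
  | nil => intro acc; rfl
  | cons i rest ih =>
    intro acc
    simp only [List.foldl]
    set L := (if (i : Int) < (lemmas.length : Int) then PySem.List.pyGetD lemmas i ""
              else if lemmas ≠ [] then PySem.List.pyGetD lemmas (-1) "" else "") with hL
    set B := (if (i : Int) < (bases.length : Int) then PySem.List.pyGetD bases i ""
              else if bases ≠ [] then PySem.List.pyGetD bases (-1) "" else L) with hB2
    by_cases h : L = "" ∧ B = ""
    · have hcond : ¬(L ≠ "" ∨ B ≠ "") := by
        rcases h with ⟨h1, h2⟩; simp [h1, h2]
      rw [if_pos h, if_neg hcond]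
      exact ih acc
    · have hcond : L ≠ "" ∨ B ≠ "" := not_and_or.mp h
      rw [if_neg h, if_pos hcond]
      have hstep := ih (acc ++ [(if L ≠ "" then L else B, if B ≠ "" then B else L)])
      rw [List.map_append] at hstep
      exact hstep

lemma outer_eq (text : String) (lemmas bases : List String) :
    expand_tilde_text_py text lemmas bases = expand_tilde_text_py_alt text lemmas bases := by
  simp only [expand_tilde_text_py, expand_tilde_text_py_alt]
  have hB : ∀ (pairs : List (String × String)),
      pairs.foldl (fun acc lb => acc ++ [pvReplB text lb.1 lb.2]) []
        = pairs.map (fun lb => pvReplA text lb.1 lb.2) := by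
    intro pairs
    rw [PySem.List.foldl_append_singleton_eq_map]
    exact List.map_congr_left (fun lb _ => (repl_eq text lb.1 lb.2).symm)
  rw [hB]
  rw [← fold_pairs text lemmas bases _ []]
  simp only [List.map_nil]
  have hD := dedup_loop ((PySem.List.pyRange 0 (max (max (lemmas.length : Int) (bases.length : Int)) 1) 1).foldl
    (fun acc idx =>
      let lem := if idx < (lemmas.length : Int) then PySem.List.pyGetD lemmas idx ""
                 else (if lemmas ≠ [] then PySem.List.pyGetD lemmas (-1) "" else "")
      let base := if idx < (bases.length : Int) then PySem.List.pyGetD bases idx ""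
                  else (if bases ≠ [] then PySem.List.pyGetD bases (-1) "" else lem)
      if lem = "" ∧ base = "" then acc
      else acc ++ [pvReplA text (if lem ≠ "" then lem else base) (if base ≠ "" then base else lem)]) []) []
  simp only [PySem.Set.empty] at hD ⊢
  rw [hD]
  rw [PySem.List.dedup]
  rw [PySem.Set.ofList_eq_foldl]

-- ===== VERDICT (by name: the statement is the Claim_ definition above) =====
theorem expand_tilde_text_py_spec : Claim_equal_expand_tilde_text_py := by
  intro text lemmas bases _
  exact outer_eq text lemmas bases
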